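-- pv_equiv track=rewrite | github.com/jong8jong8/algorithm | grokking/ch06/breadth_first_search.py | bfs
-- ===== SOURCE A (Python) =====
-- from collections import deque
--
-- def is_seller(name):
--     return name[-1] == 'm'
--
-- def bfs(graph, name):
--     queue = deque()
--     searched = set()
--     queue += graph[name]
--     while queue:
--         person = queue.popleft()
--         if person not in searched:
--             if is_seller(person):
--                 return person
--             else:
--                 queue += graph[person]
--                 searched.add(person)
--     return "nobody"
--
-- graph = {}
-- ===== SOURCE B (Python) =====
-- def is_seller(name):
--     return name[-1] == 'm'
--
-- def bfs(graph, name):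
--     # Recursive level-by-level search: each level is first scanned whole for a
--     # seller (detection pass), and only seller-free levels are expanded (expansion
--     # pass), so sellers never touch the visited set.
--     def search(layer, seen):
--         if not layer:
--             return "nobody"
--         for person in layer:
--             if is_seller(person):
--                 return person
--         nxt = []
--         for person in layer:
--             if person not in seen:
--                 seen.add(person)
--                 nxt += graph[person]
--         return search(nxt, seen)
--     return search(list(graph[name]), set())
-- ===== Notes on version B (the rewrite author's own statement) =====
-- stated objective: alternative
-- what changed: Replaces A's single imperative deque loop (pop one person, inline searched-then-seller check, append contacts to the shared FIFO) by a recursive level-by-level search in which each level is processed in two staged passes: a detection pass that scans the whole level for a seller first, and a separate expansion pass over seller-free levels that builds the next level, so sellers never reach the visited-set bookkeeping.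
-- outside the precondition, e.g. on bfs({'a': [], 'b': ['zzz']}, 'a'): A returns 'nobody', B returns 'nobody'
import Mathlib
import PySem

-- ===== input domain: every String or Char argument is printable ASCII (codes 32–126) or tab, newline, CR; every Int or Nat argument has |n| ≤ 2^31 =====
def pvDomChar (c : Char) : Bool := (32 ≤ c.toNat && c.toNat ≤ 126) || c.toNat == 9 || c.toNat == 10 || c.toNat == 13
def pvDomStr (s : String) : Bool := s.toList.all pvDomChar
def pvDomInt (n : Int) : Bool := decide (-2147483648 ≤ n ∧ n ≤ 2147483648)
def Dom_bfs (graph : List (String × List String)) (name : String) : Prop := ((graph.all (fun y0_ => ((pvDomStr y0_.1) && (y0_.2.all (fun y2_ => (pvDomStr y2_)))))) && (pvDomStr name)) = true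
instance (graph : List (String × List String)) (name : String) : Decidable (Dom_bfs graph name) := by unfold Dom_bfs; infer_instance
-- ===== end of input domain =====

-- B replaces A's single deque loop by a recursive level-by-level search with two staged
-- passes per level (seller-detection pass, then expansion pass); same value on Pre_bfs.

-- ===== PORT A =====
-- is_seller(name): name[-1] == 'm'  (IndexError on "" is outside Pre_bfs; the port then returns false)
def isSeller (s : String) : Bool :=
  match PySem.Str.pyGet? s (-1) with
  | some c => c == 'm'
  | none => false

-- A's while-loop over the deque; fuel only makes the recursion total (it never runs out
-- under Pre_bfs: at most 2·(total adjacency length) people are ever dequeued).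
-- The 'none' branch of graph[person] is Python's KeyError, outside Pre_bfs.
def bfsLoopA (graph : List (String × List String)) :
    Nat → List String → PySem.Set String → String
  | _, [], _ => "nobody"
  | 0, _ :: _, _ => "nobody"
  | f + 1, person :: rest, searched =>
    if person ∈ searched then
      bfsLoopA graph f rest searched
    else if isSeller person then person
    else
      match List.lookup person graph with
      | some vs => bfsLoopA graph f (rest ++ vs) (searched.add person)
      | none => "nobody"

def bfsFuel (graph : List (String × List String)) : Nat :=
  2 * (graph.flatMap (fun p => p.2)).length + 1

def bfs (graph : List (String × List String)) (name : String) : String :=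
  match List.lookup name graph with
  | some vs => bfsLoopA graph (bfsFuel graph) vs PySem.Set.empty
  | none => "nobody"   -- KeyError, outside Pre_bfs

-- ===== PORT B =====
-- B's detection pass: 'for person in layer: if is_seller(person): return person'
def firstSeller : List String → Option String
  | [] => none
  | p :: rest => if isSeller p then some p else firstSeller rest

-- B's expansion pass over a (seller-free) level; one fuel unit per iteration (totality
-- only); .inl "nobody" is the KeyError of graph[person], outside Pre_bfs (or fuel-out).
def expandB (graph : List (String × List String)) :
    Nat → List String → PySem.Set String → List String →
    Sum String (Nat × List String × PySem.Set String)
  | f, [], seen, nxt => .inr (f, nxt, seen)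
  | 0, _ :: _, _, _ => .inl "nobody"
  | f + 1, person :: rest, seen, nxt =>
    if person ∈ seen then expandB graph f rest seen nxt
    else
      match List.lookup person graph with
      | some vs => expandB graph f rest (seen.add person) (nxt ++ vs)
      | none => .inl "nobody"

-- the fact searchB's termination cites: the expansion pass consumes one fuel unit per element
theorem expandB_fuel_eq (graph : List (String × List String)) :
    ∀ (layer : List String) (f : Nat) (s : PySem.Set String) (acc : List String)
      (f' : Nat) (nxt : List String) (s' : PySem.Set String),
      expandB graph f layer s acc = .inr (f', nxt, s') → f' + layer.length = f := by
  intro layer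
  induction layer with
  | nil =>
    intro f s acc f' nxt s' h
    simp [expandB] at h
    simp [h.1]
  | cons p rest ih =>
    intro f s acc f' nxt s' h
    cases f with
    | zero => simp [expandB] at h
    | succ g =>
      simp only [expandB] at h
      split at h
      · have := ih g s acc f' nxt s' h; simp; omega
      · split at h
        · have := ih g _ _ f' nxt s' h; simp; omega
        · exact absurd h (by simp)

-- B's recursive 'search(layer, seen)'
def searchB (graph : List (String × List String)) (fuel : Nat)
    (layer : List String) (seen : PySem.Set String) : String :=
  match layer with
  | [] => "nobody"
  | p :: rest =>
    match firstSeller (p :: rest) with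
    | some q => q
    | none =>
      match h : expandB graph fuel (p :: rest) seen [] with
      | .inl r => r
      | .inr (f', nxt, s') => searchB graph f' nxt s'
termination_by fuel
decreasing_by
  have := expandB_fuel_eq graph (p :: rest) fuel seen [] f' nxt s' h
  simp at this; omega

def bfs_alt (graph : List (String × List String)) (name : String) : String :=
  match List.lookup name graph with
  | some vs => searchB graph (bfsFuel graph) vs PySem.Set.empty
  | none => "nobody"

-- ===== PRECONDITION & SPEC =====
-- Pre_bfs excludes exactly the inputs on which A can raise: name must be a key of graph
-- (else KeyError), and every adjacency-list entry must be nonempty (else IndexError in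
-- is_seller) and be either a seller or itself a key (else KeyError when expanded).
-- This is conservative: it also excludes graphs whose only bad entries are unreachable
-- from name (A then still returns), because reachability is not a closed-form condition.
def Pre_bfs (graph : List (String × List String)) (name : String) : Prop :=
  name ∈ graph.map Prod.fst ∧
  ∀ p ∈ graph, ∀ v ∈ p.2, v ≠ "" ∧ (isSeller v = true ∨ v ∈ graph.map Prod.fst)
instance (graph : List (String × List String)) (name : String) : Decidable (Pre_bfs graph name) := by unfold Pre_bfs; infer_instance

def pvWitness_bfs : (List (String × List String)) × String :=
  ([("you", ["alice", "bob"]), ("alice", ["peggy"]), ("bob", ["anuj", "peggy"]),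
    ("peggy", ["thom"]), ("anuj", []), ("thom", [])], "you")

def Spec_bfs (graph : List (String × List String)) (name : String) (out : String) : Prop := out = bfs_alt graph name
instance (graph : List (String × List String)) (name : String) (out : String) : Decidable (Spec_bfs graph name out) := by unfold Spec_bfs; infer_instance

-- ===== CLAIM (what is proved, stated in full; the proofs are below) =====
def Claim_equal_bfs : Prop := ∀ (graph : List (String × List String)) (name : String), Dom_bfs graph name → Pre_bfs graph name → Spec_bfs graph name (bfs graph name)

-- ===== LEMMAS AND PROOFS =====

-- searched/seen only ever contains non-sellers
def NoSellers (s : PySem.Set String) : Prop := ∀ x ∈ s, isSeller x = false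

-- a person is either a seller or a key of the graph
def GoodP (graph : List (String × List String)) (x : String) : Prop :=
  isSeller x = true ∨ (List.lookup x graph).isSome = true

theorem firstSeller_none : ∀ (l : List String), firstSeller l = none →
    ∀ x ∈ l, isSeller x = false := by
  intro l
  induction l with
  | nil => simp
  | cons p rest ih =>
    intro h x hx
    simp only [firstSeller] at h
    by_cases hp : isSeller p = true
    · simp [hp] at h
    · rcases List.mem_cons.1 hx with hx | hx
      · subst hx; simpa using hp
      · simp only [hp, Bool.false_eq_true, if_false] at h
        exact ih h x hx

theorem lookup_mem {α : Type} [DecidableEq α] {β : Type} :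
    ∀ (g : List (α × β)) (a : α) (vs : β), List.lookup a g = some vs → (a, vs) ∈ g := by
  intro g
  induction g with
  | nil => simp [List.lookup]
  | cons e rest ih =>
    intro a vs h
    rw [List.lookup] at h
    by_cases he : a = e.1
    · subst he; simp at h; subst h; simp
    · simp [beq_eq_false_iff_ne.mpr he] at h
      exact List.mem_cons_of_mem e (ih a vs h)

theorem lookup_isSome_of_mem_keys {α : Type} [DecidableEq α] {β : Type} :
    ∀ (g : List (α × β)) (a : α), a ∈ g.map Prod.fst → (List.lookup a g).isSome = true := by
  intro g
  induction g with
  | nil => simp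
  | cons e rest ih =>
    intro a ha
    rw [List.lookup]
    by_cases he : a = e.1
    · simp [he]
    · simp only [beq_eq_false_iff_ne.mpr he]
      simp only [List.map_cons, List.mem_cons] at ha
      rcases ha with ha | ha
      · exact absurd ha he
      · exact ih a ha

-- the total adjacency length of the not-yet-searched part of the graph
def Ucount : List (String × List String) → PySem.Set String → Nat
  | [], _ => 0
  | e :: g, s => (if e.1 ∈ s then 0 else e.2.length) + Ucount g s

theorem Ucount_empty : ∀ (g : List (String × List String)),
    Ucount g PySem.Set.empty = (g.flatMap (fun p => p.2)).length := by
  intro g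
  induction g with
  | nil => rfl
  | cons e rest ih =>
    simp only [Ucount, List.flatMap_cons, List.length_append]
    rw [if_neg (by simp [PySem.Set.empty]), ih]

theorem Ucount_mono : ∀ (g : List (String × List String)) (s s' : PySem.Set String),
    (∀ x, x ∈ s → x ∈ s') → Ucount g s' ≤ Ucount g s := by
  intro g s s' hsub
  induction g with
  | nil => simp [Ucount]
  | cons e rest ih =>
    simp only [Ucount]
    by_cases he : e.1 ∈ s
    · have := hsub e.1 he
      simp [he, this]; omega
    · simp [he]
      split <;> omega

theorem Ucount_add : ∀ (g : List (String × List String)) (s : PySem.Set String)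
    (p : String) (vs : List String), p ∉ s → List.lookup p g = some vs →
    Ucount g (s.add p) + vs.length ≤ Ucount g s := by
  intro g
  induction g with
  | nil => simp [List.lookup]
  | cons e rest ih =>
    obtain ⟨k, ws⟩ := e
    intro s p vs hp hl
    rw [List.lookup] at hl
    simp only [Ucount]
    by_cases he : p = k
    · subst he
      simp at hl
      subst hl
      have hmem : p ∈ s.add p := (PySem.Set.mem_add _ _ _).2 (Or.inr rfl)
      rw [if_pos hmem, if_neg hp]
      have := Ucount_mono rest s (s.add p) (fun x hx => (PySem.Set.mem_add _ _ _).2 (Or.inl hx))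
      omega
    · simp [beq_eq_false_iff_ne.mpr he] at hl
      have := ih s p vs hp hl
      by_cases hes : k ∈ s
      · have hmem : k ∈ s.add p := (PySem.Set.mem_add _ _ _).2 (Or.inl hes)
        rw [if_pos hmem, if_pos hes]
        omega
      · have hens : k ∉ s.add p := by
          intro hc
          rcases (PySem.Set.mem_add _ _ _).1 hc with h | h
          · exact hes h
          · exact he h.symm
        rw [if_neg hens, if_neg hes]
        omega

-- expansion keeps the no-sellers invariant (the level is seller-free)
theorem expandB_inv (graph : List (String × List String)) :
    ∀ (layer : List String) (f : Nat) (s : PySem.Set String) (acc : List String)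
      (f' : Nat) (nxt : List String) (s' : PySem.Set String),
      NoSellers s → (∀ x ∈ layer, isSeller x = false) →
      expandB graph f layer s acc = .inr (f', nxt, s') → NoSellers s' := by
  intro layer
  induction layer with
  | nil =>
    intro f s acc f' nxt s' hs _ h
    simp [expandB] at h
    obtain ⟨-, -, h3⟩ := h
    exact h3 ▸ hs
  | cons p rest ih =>
    intro f s acc f' nxt s' hs hl h
    cases f with
    | zero => simp [expandB] at h
    | succ g =>
      simp only [expandB] at h
      split at h
      · exact ih g s acc f' nxt s' hs (fun x hx => hl x (List.mem_cons_of_mem p hx)) h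
      · split at h
        · refine ih g _ _ f' nxt s' ?_ (fun x hx => hl x (List.mem_cons_of_mem p hx)) h
          intro x hx
          rcases (PySem.Set.mem_add _ _ _).1 hx with hx | hx
          · exact hs x hx
          · subst hx; exact hl x List.mem_cons_self
        · exact absurd h (by simp)

-- every element of the produced next level is an accumulator element or an adjacency value
theorem expandB_elems (graph : List (String × List String)) :
    ∀ (layer : List String) (f : Nat) (s : PySem.Set String) (acc : List String)
      (f' : Nat) (nxt : List String) (s' : PySem.Set String),
      expandB graph f layer s acc = .inr (f', nxt, s') →
      ∀ x ∈ nxt, x ∈ acc ∨ ∃ e ∈ graph, x ∈ e.2 := by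
  intro layer
  induction layer with
  | nil =>
    intro f s acc f' nxt s' h x hx
    simp [expandB] at h
    obtain ⟨-, h2, -⟩ := h
    exact Or.inl (h2 ▸ hx)
  | cons p rest ih =>
    intro f s acc f' nxt s' h x hx
    cases f with
    | zero => simp [expandB] at h
    | succ g =>
      simp only [expandB] at h
      split at h
      · exact ih g s acc f' nxt s' h x hx
      · split at h
        case _ vs hvs =>
          rcases ih g _ _ f' nxt s' h x hx with hxa | hxa
          · rcases List.mem_append.1 hxa with hxa | hxa
            · exact Or.inl hxa
            · exact Or.inr ⟨(p, vs), lookup_mem graph p vs hvs, hxa⟩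
          · exact Or.inr hxa
        · exact absurd h (by simp)

-- fuel bookkeeping: expansion never increases length-plus-unsearched-adjacency
theorem expandB_count (graph : List (String × List String)) :
    ∀ (layer : List String) (f : Nat) (s : PySem.Set String) (acc : List String)
      (f' : Nat) (nxt : List String) (s' : PySem.Set String),
      expandB graph f layer s acc = .inr (f', nxt, s') →
      Ucount graph s' + nxt.length ≤ Ucount graph s + acc.length := by
  intro layer
  induction layer with
  | nil =>
    intro f s acc f' nxt s' h
    simp [expandB] at h
    obtain ⟨-, h2, h3⟩ := h
    subst h2; subst h3; omega
  | cons p rest ih =>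
    intro f s acc f' nxt s' h
    cases f with
    | zero => simp [expandB] at h
    | succ g =>
      simp only [expandB] at h
      by_cases hp : p ∈ s
      · rw [if_pos hp] at h
        exact ih g s acc f' nxt s' h
      · rw [if_neg hp] at h
        cases hvs : List.lookup p graph with
        | none => rw [hvs] at h; exact absurd h (by simp)
        | some vs =>
          rw [hvs] at h
          have h1 := ih g _ _ f' nxt s' h
          have h2 := Ucount_add graph s p vs hp hvs
          simp at h1
          omega

-- A returns the first seller of a layer (whatever follows in the deque) given enough fuel
theorem loopA_seller (graph : List (String × List String)) :
    ∀ (layer : List String) (f : Nat) (acc : List String) (s : PySem.Set String) (p : String),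
      NoSellers s → (∀ x ∈ layer, GoodP graph x) → layer.length ≤ f →
      firstSeller layer = some p → bfsLoopA graph f (layer ++ acc) s = p := by
  intro layer
  induction layer with
  | nil => simp [firstSeller]
  | cons q rest ih =>
    intro f acc s p hs hg hf hfs
    cases f with
    | zero => simp at hf
    | succ g =>
      simp only [firstSeller] at hfs
      simp only [List.cons_append, bfsLoopA]
      by_cases hsell : isSeller q = true
      · have hq : q ∉ s := fun hc => by simp [hs q hc] at hsell
        simp only [hsell, if_true] at hfs
        simp [hq, hsell]
        exact (Option.some_inj.1 hfs)
      · simp only [hsell] at hfs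
        by_cases hq : q ∈ s
        · simp only [hq, if_true]
          exact ih g acc s p hs (fun x hx => hg x (List.mem_cons_of_mem q hx))
            (by simp at hf; omega) hfs
        · simp only [hq, if_false, hsell, Bool.false_eq_true, if_false]
          rcases hg q List.mem_cons_self with hgood | hgood
          · exact absurd hgood hsell
          · cases hvs : List.lookup q graph with
            | none => rw [hvs] at hgood; simp at hgood
            | some vs =>
              simp only []
              have : rest ++ acc ++ vs = rest ++ (acc ++ vs) := List.append_assoc _ _ _
              rw [this]
              refine ih g (acc ++ vs) (s.add q) p ?_
                (fun x hx => hg x (List.mem_cons_of_mem q hx)) (by simp at hf ⊢; omega) hfs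
              intro x hx
              rcases (PySem.Set.mem_add _ _ _).1 hx with hx | hx
              · exact hs x hx
              · subst hx; simpa using hsell
-- A's deque loop across a seller-free layer equals B's expansion pass followed by A's loop
theorem loopA_eq_expand (graph : List (String × List String)) :
    ∀ (layer : List String) (f : Nat) (acc : List String) (s : PySem.Set String),
      (∀ x ∈ layer, isSeller x = false) → NoSellers s →
      bfsLoopA graph f (layer ++ acc) s =
        (match expandB graph f layer s acc with
         | .inl r => r
         | .inr (f', nxt, s') => bfsLoopA graph f' nxt s') := by
  intro layer
  induction layer with
  | nil => intro f acc s _ _; simp [expandB]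
  | cons p rest ih =>
    intro f acc s hl hs
    cases f with
    | zero => simp [bfsLoopA, expandB]
    | succ g =>
      have hsell : isSeller p = false := hl p List.mem_cons_self
      simp only [List.cons_append, bfsLoopA, expandB]
      by_cases hp : p ∈ s
      · simp only [hp, if_true]
        exact ih g acc s (fun x hx => hl x (List.mem_cons_of_mem p hx)) hs
      · simp only [hp, if_false, hsell, Bool.false_eq_true, if_false]
        cases hget : List.lookup p graph with
        | none => simp
        | some vs =>
          simp only [List.append_assoc]
          exact ih g (acc ++ vs) (s.add p)
            (fun x hx => hl x (List.mem_cons_of_mem p hx))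
            (by
              intro x hx
              rcases (PySem.Set.mem_add _ _ _).1 hx with hx | hx
              · exact hs x hx
              · subst hx; exact hsell)

-- the two searches agree whenever the fuel respects the counting invariant
theorem loopA_eq_searchB (graph : List (String × List String))
    (hwf : ∀ e ∈ graph, ∀ v ∈ e.2, GoodP graph v) :
    ∀ (f : Nat) (layer : List String) (s : PySem.Set String),
      NoSellers s → (∀ x ∈ layer, GoodP graph x) →
      layer.length + Ucount graph s + 1 ≤ f →
      bfsLoopA graph f layer s = searchB graph f layer s := by
  intro f
  induction f using Nat.strong_induction_on with
  | _ f ihf =>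
    intro layer s hs hg hinv
    cases layer with
    | nil =>
      cases f <;> simp [bfsLoopA, searchB]
    | cons p rest =>
      rw [searchB]
      cases hfs : firstSeller (p :: rest) with
      | some q =>
        have := loopA_seller graph (p :: rest) f [] s q hs hg (by omega) hfs
        rw [List.append_nil] at this
        rw [this]
      | none =>
        have hnone := firstSeller_none (p :: rest) hfs
        have := loopA_eq_expand graph (p :: rest) f [] s hnone hs
        rw [List.append_nil] at this
        rw [this]
        cases h : expandB graph f (p :: rest) s [] with
        | inl r => simp
        | inr t =>
          obtain ⟨f', nxt, s'⟩ := t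
          simp only []
          have hfuel := expandB_fuel_eq graph (p :: rest) f s [] f' nxt s' h
          have hcnt := expandB_count graph (p :: rest) f s [] f' nxt s' h
          simp at hfuel hcnt
          simp only [List.length_cons] at hinv
          refine ihf f' (by omega) nxt s'
            (expandB_inv graph (p :: rest) f s [] f' nxt s' hs hnone h)
            (fun x hx => ?_) (by omega)
          rcases expandB_elems graph (p :: rest) f s [] f' nxt s' h x hx with hxa | ⟨e, he, hxe⟩
          · simp at hxa
          · exact hwf e he x hxe

theorem mem_length_le_flatMap : ∀ (g : List (String × List String)) (a : String) (vs : List String),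
    (a, vs) ∈ g → vs.length ≤ (g.flatMap (fun p => p.2)).length := by
  intro g a vs
  induction g with
  | nil => simp
  | cons e rest ih =>
    intro h
    rcases List.mem_cons.1 h with h | h
    · rw [← h]
      simp only [List.flatMap_cons, List.length_append]
      omega
    · have := ih h
      simp only [List.flatMap_cons, List.length_append]
      omega

-- ===== VERDICT (by name: the statement is the Claim_ definition above) =====
theorem bfs_spec : Claim_equal_bfs := by
  intro graph name _ hpre
  obtain ⟨hname, hvals⟩ := hpre
  unfold Spec_bfs bfs bfs_alt
  cases hvs : List.lookup name graph with
  | none =>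
    have := lookup_isSome_of_mem_keys graph name hname
    simp [hvs] at this
  | some vs =>
    have hwf : ∀ e ∈ graph, ∀ v ∈ e.2, GoodP graph v := by
      intro e he v hv
      rcases (hvals e he v hv).2 with h | h
      · exact Or.inl h
      · exact Or.inr (lookup_isSome_of_mem_keys graph v h)
    have hmem := lookup_mem graph name vs hvs
    have hlen := mem_length_le_flatMap graph name vs hmem
    refine loopA_eq_searchB graph hwf (bfsFuel graph) vs PySem.Set.empty
      (by intro x hx; simp [PySem.Set.empty] at hx) (fun x hx => ?_) ?_
    · rcases (hvals (name, vs) hmem x hx).2 with h | h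
      · exact Or.inl h
      · exact Or.inr (lookup_isSome_of_mem_keys graph x h)
    · rw [Ucount_empty]
      unfold bfsFuel
      omega
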